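-- pv_equiv track=rewrite | github.com/hitner/python_practise | card_game/card.py | split_bin_cards
-- ===== SOURCE A (Python) =====
-- class SplitMachine:
--     def __init__(self):
--         self.state = 0 #1表示，当前有值还可以继续处理 （其实除了一开始是0后面一直是1）
--         self.cards = []
--
--     def process(self,c):
--         """返回一个tuple（长度，字符）"""
--         if self.state:
--             if self.cards[0] == c:
--                 self.cards.append(c)
--             else:
--                 ret = len(self.cards), self.cards[0]
--                 self.cards = [c]
--                 return ret
--         else:
--             self.state = 1
--             self.cards = [c]
--
--     def end(self):
--         ret = None
--         if self.state:
--             ret = len(self.cards), self.cards[0]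
--             self.state = 0
--             self.cards = []
--         return ret
--
-- def split_bin_cards(cards):
--     """
--     把一手牌分解为一个dict，分别存储4、3、2、1的牌数
--     输入的cards必须是已经排过序的了
--     """
--     result = {}
--
--     def add_result(ret):
--         if ret:
--             if ret[0] in result:
--                 result[ret[0]].append(ret[1])
--             else:
--                 result[ret[0]] = [ret[1]]
--
--     sm = SplitMachine()
--     for c in cards:
--         r = sm.process(c)
--         add_result(r)
--     r = sm.end()
--     add_result(r)
--
--     return result
-- ===== SOURCE B (Python) =====
-- def split_bin_cards(cards):
--     """
--     Same result as A: dict mapping run length -> list of card values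
--     (cards assumed pre-sorted so equal cards are adjacent), but computed
--     by a two-pointer scan over maximal runs instead of a per-card state machine.
--     """
--     result = {}
--     i = 0
--     n = len(cards)
--     while i < n:
--         j = i + 1
--         while j < n and cards[j] == cards[i]:
--             j += 1
--         result.setdefault(j - i, []).append(cards[i])
--         i = j
--     return result
-- ===== Notes on version B (the rewrite author's own statement) =====
-- stated objective: simpler
-- what changed: Replaces the SplitMachine class (per-card state machine with an explicit end-flush) by a direct two-pointer scan over maximal runs of equal cards, recording (length -> value) with setdefault.
import Mathlib
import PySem

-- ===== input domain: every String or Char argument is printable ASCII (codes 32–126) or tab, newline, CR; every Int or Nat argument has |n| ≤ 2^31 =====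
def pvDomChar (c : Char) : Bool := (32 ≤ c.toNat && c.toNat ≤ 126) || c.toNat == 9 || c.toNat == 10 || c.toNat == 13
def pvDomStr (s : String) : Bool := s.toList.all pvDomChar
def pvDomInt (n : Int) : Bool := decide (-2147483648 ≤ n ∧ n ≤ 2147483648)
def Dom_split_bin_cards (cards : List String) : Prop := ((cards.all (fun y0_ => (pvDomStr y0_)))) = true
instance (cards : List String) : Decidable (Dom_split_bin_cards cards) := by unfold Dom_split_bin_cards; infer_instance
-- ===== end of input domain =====

-- B replaces A's per-card SplitMachine (state machine + end-flush) by a direct scan over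
-- maximal runs of equal cards (objective: simpler). Neither version mutates its argument.

-- ===== PORT A =====
-- add_result: if ret is truthy, append ret[1] under key ret[0] (new key -> fresh singleton)
def pvAddResult (result : PySem.Dict Int (List String)) : Option (Int × String) → PySem.Dict Int (List String)
  | none => result
  | some (n, v) =>
      if result.contains n then result.insert n (result.getD n [] ++ [v])
      else result.insert n [v]

-- SplitMachine.process: (state, cards) × returned tuple; cards[0] read via headD ""
-- (cards is nonempty whenever state ≠ 0, so the default is never the value used)
def pvProcess (state : Int) (cs : List String) (c : String) : (Int × List String) × Option (Int × String) :=
  if state ≠ 0 then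
    if cs.headD "" == c then ((state, cs ++ [c]), none)
    else ((state, [c]), some ((cs.length : Int), cs.headD ""))
  else ((1, [c]), none)

-- SplitMachine.end
def pvEnd (state : Int) (cs : List String) : Option (Int × String) :=
  if state ≠ 0 then some ((cs.length : Int), cs.headD "") else none

-- one iteration of the for-loop: r = sm.process(c); add_result(r)
def pvStep (acc : PySem.Dict Int (List String) × Int × List String) (c : String) :
    PySem.Dict Int (List String) × Int × List String :=
  let p := pvProcess acc.2.1 acc.2.2 c
  (pvAddResult acc.1 p.2, p.1)

-- after the loop: r = sm.end(); add_result(r)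
def pvFinish (acc : PySem.Dict Int (List String) × Int × List String) : PySem.Dict Int (List String) :=
  pvAddResult acc.1 (pvEnd acc.2.1 acc.2.2)

def split_bin_cards (cards : List String) : List (Int × List String) :=
  (pvFinish (cards.foldl pvStep ((PySem.Dict.empty : PySem.Dict Int (List String)), (0 : Int), ([] : List String)))).items

-- ===== PORT B =====
-- result.setdefault(n, []).append(v): ensure the key, then re-store its list with v appended
def pvRunStore (result : PySem.Dict Int (List String)) (n : Int) (v : String) : PySem.Dict Int (List String) :=
  let d1 := result.setdefault n []
  d1.insert n (d1.getD n [] ++ [v])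

-- the while loop of Source B over the suffix cards[i:]: the inner counting loop (j - i)
-- is the length of the maximal equal prefix (= takeWhile), and i = j advances past
-- the run (= dropWhile); recursion on the suffix renders the index loop
def pvAltLoop (result : PySem.Dict Int (List String)) : List String → PySem.Dict Int (List String)
  | [] => result
  | head :: tl =>
      pvAltLoop (pvRunStore result (1 + ((tl.takeWhile (· == head)).length : Int)) head)
        (tl.dropWhile (· == head))
termination_by l => l.length
decreasing_by
  have := List.length_dropWhile_le (p := (· == head)) (l := tl)
  simp; omega

def split_bin_cards_alt (cards : List String) : List (Int × List String) :=
  (pvAltLoop PySem.Dict.empty cards).items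

-- ===== PRECONDITION & SPEC =====
def Spec_split_bin_cards (cards : List String) (out : List (Int × List String)) : Prop := out = split_bin_cards_alt cards
instance (cards : List String) (out : List (Int × List String)) : Decidable (Spec_split_bin_cards cards out) := by unfold Spec_split_bin_cards; infer_instance

-- ===== CLAIM (what is proved, stated in full; the proofs are below) =====
def Claim_equal_split_bin_cards : Prop := ∀ (cards : List String), Dom_split_bin_cards cards → Spec_split_bin_cards cards (split_bin_cards cards)

-- ===== LEMMAS AND PROOFS =====

-- A's add_result on a real tuple is B's setdefault-and-append
lemma addResult_eq_runStore (d : PySem.Dict Int (List String)) (n : Int) (v : String) :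
    pvAddResult d (some (n, v)) = pvRunStore d n v := by
  show (if d.contains n then d.insert n (d.getD n [] ++ [v]) else d.insert n [v])
      = (d.setdefault n []).insert n ((d.setdefault n []).getD n [] ++ [v])
  by_cases h : d.contains n
  · rw [if_pos h, PySem.Dict.setdefault_of_contains d ([] : List String) h]
  · rw [if_neg h, PySem.Dict.setdefault_of_not_contains d ([] : List String) (Bool.of_not_eq_true h)]
    simp [PySem.Dict.getD_insert_self, PySem.Dict.insert_insert_self]

lemma takeWhile_replicate_append (v c : String) (hc : (c == v) = false) (k : Nat) (tl : List String) :
    (List.replicate k v ++ c :: tl).takeWhile (· == v) = List.replicate k v := by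
  induction k with
  | zero => simp [hc]
  | succ k ih => simp [List.replicate_succ, ih]

lemma dropWhile_replicate_append (v c : String) (hc : (c == v) = false) (k : Nat) (tl : List String) :
    (List.replicate k v ++ c :: tl).dropWhile (· == v) = c :: tl := by
  induction k with
  | zero => simp [hc]
  | succ k ih => simp [List.replicate_succ, ih]

-- Invariant: from state 1 holding a run of k+1 copies of v, A's fold + end-flush
-- computes what B's run loop computes on (that run ++ the remaining cards).
lemma machine_run (cards : List String) :
    ∀ (d : PySem.Dict Int (List String)) (k : Nat) (v : String),
    pvFinish (cards.foldl pvStep (d, (1 : Int), v :: List.replicate k v))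
      = pvAltLoop d (v :: (List.replicate k v ++ cards)) := by
  induction cards with
  | nil =>
    intro d k v
    have he : pvEnd 1 (v :: List.replicate k v) = some (((k : Int) + 1), v) := by
      simp [pvEnd]
    rw [List.foldl_nil, pvAltLoop]
    simp only [List.append_nil, List.takeWhile_replicate, List.dropWhile_replicate,
      beq_self_eq_true, if_true, List.length_replicate]
    rw [pvAltLoop]
    unfold pvFinish
    rw [he, addResult_eq_runStore]
    congr 1
    ring
  | cons c tl ih =>
    intro d k v
    rw [List.foldl_cons]
    by_cases h : (v == c) = true
    · have hv : v = c := by simpa using h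
      subst hv
      have hs : pvStep (d, (1 : Int), v :: List.replicate k v) v
          = (d, (1 : Int), v :: List.replicate (k + 1) v) := by
        simp [pvStep, pvProcess, pvAddResult, List.replicate_succ']
      rw [hs, ih d (k + 1) v]
      have harg : List.replicate (k + 1) v ++ tl = List.replicate k v ++ v :: tl := by
        simp [List.replicate_succ']
      rw [harg]
    · have hvc : (v == c) = false := by simpa using h
      have hcv : (c == v) = false := by
        rw [beq_eq_false_iff_ne] at hvc ⊢; exact fun e => hvc e.symm
      have hs : pvStep (d, (1 : Int), v :: List.replicate k v) c
          = (pvAddResult d (some (((k : Int) + 1), v)), (1 : Int), c :: List.replicate 0 c) := by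
        simp [pvStep, pvProcess, hvc, List.replicate]
      rw [hs, ih _ 0 c]
      simp only [List.replicate, List.nil_append]
      conv_rhs => rw [pvAltLoop]
      rw [takeWhile_replicate_append v c hcv, dropWhile_replicate_append v c hcv,
        addResult_eq_runStore]
      congr 2
      simp
      ring

-- ===== VERDICT (by name: the statement is the Claim_ definition above) =====
theorem split_bin_cards_spec : Claim_equal_split_bin_cards := by
  intro cards _
  show split_bin_cards cards = split_bin_cards_alt cards
  cases cards with
  | nil => simp [split_bin_cards, split_bin_cards_alt, pvFinish, pvEnd, pvAddResult, pvAltLoop]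
  | cons c tl =>
    unfold split_bin_cards split_bin_cards_alt
    rw [List.foldl_cons]
    have hs : pvStep ((PySem.Dict.empty : PySem.Dict Int (List String)), (0 : Int), ([] : List String)) c
        = (PySem.Dict.empty, (1 : Int), c :: List.replicate 0 c) := by
      simp [pvStep, pvProcess, pvAddResult, List.replicate]
    rw [hs, machine_run tl PySem.Dict.empty 0 c]
    simp [List.replicate]
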